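-- pv_equiv track=rewrite | github.com/alexander-travov/algo | InterviewBit/Arrays/Flip.py | find_flip
-- ===== SOURCE A (Python) =====
-- def find_flip(s):
--     sum_ending_here = 0
--     b = 0
--
--     sum_total = 0
--     mb = me = 0
--
--     for i, bit in enumerate(s):
--         if bit == '0':
--             sum_ending_here += 1
--         else:
--             sum_ending_here -= 1
--             if sum_ending_here < 0:
--                 b = i+1
--                 sum_ending_here = 0
--         if sum_total < sum_ending_here:
--             sum_total = sum_ending_here
--             mb = b
--             me = i+1
--
--     return mb, me
-- ===== SOURCE B (Python) =====
-- def find_flip(s):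
--     # Explicit prefix-sum table, then a single scan tracking the running minimum prefix.
--     P = [0]
--     for c in s:
--         P.append(P[-1] + (1 if c == '0' else -1))
--     cur_min, cur_min_idx = 0, 0
--     best, mb, me = 0, 0, 0
--     for j, p in enumerate(P[1:], 1):
--         if p - cur_min > best:
--             best = p - cur_min
--             mb, me = cur_min_idx, j
--         if p < cur_min:
--             cur_min, cur_min_idx = p, j
--     return mb, me
-- ===== Notes on version B (the rewrite author's own statement) =====
-- stated objective: alternative
-- what changed: Replaces A's Kadane-style running-window loop (reset-on-negative with a window-start pointer) by an explicit prefix-sum table built in a first pass, then a second scan over the table tracking the minimum prefix value and its earliest index.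
import Mathlib
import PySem

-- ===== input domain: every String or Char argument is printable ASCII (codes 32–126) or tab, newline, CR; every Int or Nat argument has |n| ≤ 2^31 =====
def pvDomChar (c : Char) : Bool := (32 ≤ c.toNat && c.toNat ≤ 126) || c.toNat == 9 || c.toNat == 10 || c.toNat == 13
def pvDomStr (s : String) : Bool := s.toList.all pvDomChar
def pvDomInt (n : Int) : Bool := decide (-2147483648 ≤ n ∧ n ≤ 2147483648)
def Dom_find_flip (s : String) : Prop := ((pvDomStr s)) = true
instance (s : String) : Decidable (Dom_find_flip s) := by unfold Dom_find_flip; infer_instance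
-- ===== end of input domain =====

-- B replaces A's Kadane-style running window by an explicit prefix-sum table plus a
-- prefix-minimum scan (alternative decomposition, same cost).

-- ===== PORT A =====
-- for i, bit in enumerate(s): Kadane loop carrying (i, sum_ending_here, b, sum_total, mb, me)
def find_flip_loop (l : List Char) (i seh b st mb me : Int) : Int × Int :=
  match l with
  | [] => (mb, me)
  | bit :: rest =>
    let (seh, b) :=
      if bit = '0' then (seh + 1, b)
      else
        let seh := seh - 1
        if seh < 0 then (0, i + 1) else (seh, b)
    let (st, mb, me) := if st < seh then (seh, b, i + 1) else (st, mb, me)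
    find_flip_loop rest (i + 1) seh b st mb me

def find_flip (s : String) : Int × Int :=
  find_flip_loop s.toList 0 0 0 0 0 0

-- ===== PORT B =====
-- phase 1: P = [0]; for c in s: P.append(P[-1] + (1 if c == '0' else -1))
def find_flip_buildP (P : List Int) (l : List Char) : List Int :=
  match l with
  | [] => P
  | c :: rest => find_flip_buildP (P ++ [P.getLastD 0 + (if c = '0' then 1 else -1)]) rest

-- phase 2: for j, p in enumerate(P[1:], 1): …
def find_flip_scan (ps : List Int) (j cmin cidx best mb me : Int) : Int × Int :=
  match ps with
  | [] => (mb, me)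
  | p :: rest =>
    let (best, mb, me) := if p - cmin > best then (p - cmin, cidx, j) else (best, mb, me)
    let (cmin, cidx) := if p < cmin then (p, j) else (cmin, cidx)
    find_flip_scan rest (j + 1) cmin cidx best mb me

def find_flip_alt (s : String) : Int × Int :=
  let P := find_flip_buildP [0] s.toList
  find_flip_scan (P.drop 1) 1 0 0 0 0 0

-- ===== PRECONDITION & SPEC =====
def Spec_find_flip (s : String) (out : Int × Int) : Prop := out = find_flip_alt s
instance (s : String) (out : Int × Int) : Decidable (Spec_find_flip s out) := by unfold Spec_find_flip; infer_instance

-- ===== CLAIM (what is proved, stated in full; the proofs are below) =====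
def Claim_equal_find_flip : Prop := ∀ (s : String), Dom_find_flip s → Spec_find_flip s (find_flip s)

-- ===== LEMMAS AND PROOFS =====

-- the list of prefix sums (excluding the starting value p) of l's ±1 values
def pvPlist (p : Int) (l : List Char) : List Int :=
  match l with
  | [] => []
  | c :: rest =>
    let p' := p + (if c = '0' then 1 else -1)
    p' :: pvPlist p' rest

theorem pvBuildP_eq (l : List Char) : ∀ (acc : List Int) (p : Int),
    find_flip_buildP (acc ++ [p]) l = acc ++ [p] ++ pvPlist p l := by
  induction l with
  | nil => intro acc p; simp [find_flip_buildP, pvPlist]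
  | cons c rest ih =>
    intro acc p
    have h : (acc ++ [p]).getLastD 0 = p := by simp
    simp only [find_flip_buildP, pvPlist, h]
    have := ih (acc ++ [p]) (p + (if c = '0' then 1 else -1))
    simpa using this

theorem pvMain (l : List Char) : ∀ (i p cmin cidx best mb me : Int),
    cmin ≤ p → 0 ≤ best →
    find_flip_loop l i (p - cmin) cidx best mb me
      = find_flip_scan (pvPlist p l) (i + 1) cmin cidx best mb me := by
  induction l with
  | nil => intro i p cmin cidx best mb me _ _; simp [find_flip_loop, pvPlist, find_flip_scan]
  | cons c rest ih =>
    intro i p cmin cidx best mb me hle hb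
    by_cases hc : c = '0'
    · -- p' = p + 1 ≥ cmin: no reset on either side
      simp only [find_flip_loop, pvPlist, find_flip_scan, hc, if_true]
      have hpc : p - cmin + 1 = (p + 1) - cmin := by ring
      have hlt : ¬ (p + 1 < cmin) := by omega
      rw [hpc]
      by_cases hupd : best < (p + 1) - cmin
      · rw [if_pos hupd, if_neg hlt]
        simpa using ih (i + 1) (p + 1) cmin cidx ((p + 1) - cmin) cidx (i + 1) (by omega) (by omega)
      · rw [if_neg hupd, if_neg hlt]
        simpa using ih (i + 1) (p + 1) cmin cidx best mb me (by omega) hb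
    · -- bit ≠ '0': value -1
      simp only [find_flip_loop, pvPlist, find_flip_scan, hc, if_false]
      have hpc : p - cmin - 1 = (p + -1) - cmin := by ring
      rw [hpc]
      by_cases hneg : (p + -1) - cmin < 0
      · -- reset: new seh = 0, b = i+1; B: new min p-1 with index i+1
        rw [if_pos hneg, if_neg (by omega : ¬ best < (0:Int)),
            if_neg (by omega : ¬ ((p + -1) - cmin > best)), if_pos (by omega : p + -1 < cmin)]
        have := ih (i + 1) (p + -1) (p + -1) (i + 1) best mb me (le_refl _) hb
        simpa using this
      · rw [if_neg hneg, if_neg (by omega : ¬ (p + -1 < cmin))]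
        by_cases hupd : best < (p + -1) - cmin
        · rw [if_pos hupd]
          simpa using ih (i + 1) (p + -1) cmin cidx ((p + -1) - cmin) cidx (i + 1) (by omega) (by omega)
        · rw [if_neg hupd]
          simpa using ih (i + 1) (p + -1) cmin cidx best mb me (by omega) hb

-- ===== VERDICT (by name: the statement is the Claim_ definition above) =====
theorem find_flip_spec : Claim_equal_find_flip := by
  intro s _
  unfold Spec_find_flip find_flip find_flip_alt
  have hP : find_flip_buildP [0] s.toList = [] ++ [0] ++ pvPlist 0 s.toList :=
    pvBuildP_eq s.toList [] 0
  rw [hP]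
  simp only [List.nil_append, List.cons_append, List.drop_succ_cons, List.drop_zero,
    List.nil_append]
  have := pvMain s.toList 0 0 0 0 0 0 0 le_rfl le_rfl
  simpa using this
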